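-- pv_equiv track=rewrite | github.com/bernikr/advent-of-code | 2018/07.py | part1
-- ===== SOURCE A (Python) =====
-- from collections import defaultdict
--
-- def get_dependencies(rules):
--     dep = defaultdict(list)
--     for prev_step, next_step in rules:
--         dep[next_step].append(prev_step)
--         if prev_step not in dep:
--             dep[prev_step] = []
--     return dict(dep)
--
-- def part1(a):
--     dep = get_dependencies(a)
--     order = []
--     while len(dep) > 0:
--         next_step = min(dep.keys(), key=lambda x: (len(dep[x]), x))
--         order.append(next_step)
--         del dep[next_step]
--         for l in dep.values():
--             if next_step in l:
--                 l.remove(next_step)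
--     return ''.join(order)
-- ===== SOURCE B (Python) =====
-- def part1(a):
--     # One pass over the rule list builds integer "remaining-dependency" counts
--     # and deduplicated successor lists; the selection loop then works on counts
--     # and a once-sorted name list instead of repeatedly scanning and editing
--     # predecessor lists inside a dict.
--     count = {}
--     succ = {}
--     for p, n in a:
--         if n not in count:
--             count[n] = 0
--             succ[n] = []
--         if p not in count:
--             count[p] = 0
--             succ[p] = []
--         count[n] += 1
--         if n not in succ[p]:
--             succ[p].append(n)
--     remaining = sorted(count)
--     out = []
--     while remaining:
--         best = remaining[0]
--         for x in remaining:
--             if count[x] < count[best]: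
--                 best = x
--         out.append(best)
--         remaining.remove(best)
--         for n in succ[best]:
--             count[n] -= 1
--     return ''.join(out)
-- ===== Notes on version B (the rewrite author's own statement) =====
-- stated objective: faster
-- what changed: Instead of keeping per-node predecessor lists in a dict and, after each pick, scanning every remaining list to delete the picked node, B precomputes integer indegree counts plus deduplicated successor lists in one pass, sorts the node names once, and on each pick only decrements the counts of the picked node's successors (Kahn-style count maintenance with a linear argmin scan over the sorted remaining names).
import Mathlib
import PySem

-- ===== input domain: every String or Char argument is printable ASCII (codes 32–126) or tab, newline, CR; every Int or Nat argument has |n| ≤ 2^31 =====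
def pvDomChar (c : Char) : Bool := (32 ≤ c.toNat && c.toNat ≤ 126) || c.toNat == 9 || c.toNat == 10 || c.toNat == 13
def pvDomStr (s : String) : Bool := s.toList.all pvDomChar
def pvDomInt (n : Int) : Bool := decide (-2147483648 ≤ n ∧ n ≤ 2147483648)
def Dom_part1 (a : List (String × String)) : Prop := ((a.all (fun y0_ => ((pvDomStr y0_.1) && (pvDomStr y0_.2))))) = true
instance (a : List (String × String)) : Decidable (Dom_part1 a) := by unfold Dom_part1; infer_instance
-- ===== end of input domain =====

-- B replaces A's per-pick rescan-and-edit of every predecessor list by indegree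
-- counts with deduplicated successor lists built in one pass (Kahn-style count
-- maintenance over a once-sorted name list); equal return value on all inputs.

-- ===== PORT A =====
-- get_dependencies: defaultdict(list); dep[next].append(prev); if prev not in dep: dep[prev] = []
def getDependencies (rules : List (String × String)) : PySem.Dict String (List String) :=
  rules.foldl (fun d pr =>
    let d := d.modify pr.2 [] (· ++ [pr.1])
    if d.contains pr.1 then d else d.insert pr.1 []) PySem.Dict.empty

-- body of A's while-loop; fuel = len(dep), which decreases by one per iteration
def part1Loop : Nat → PySem.Dict String (List String) → List String → List String
  | 0, _, order => order
  | fuel+1, dep, order =>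
    match PySem.List.min2? dep.keys (fun x => (dep.getD x []).length) (fun x => x) with
    | none => order                       -- len(dep) == 0: the while-loop exits
    | some nxt =>
      let dep := dep.erase nxt
      -- for l in dep.values(): if nxt in l: l.remove(nxt)   (remove first occurrence)
      let dep : PySem.Dict String (List String) :=
        ⟨dep.items.map (fun p => (p.1, if nxt ∈ p.2 then p.2.erase nxt else p.2))⟩
      part1Loop fuel dep (order ++ [nxt])

def part1 (a : List (String × String)) : String :=
  let dep := getDependencies a
  PySem.Str.join "" (part1Loop dep.size dep [])

-- ===== PORT B =====
-- build phase: indegree counts (with multiplicity) and deduplicated successor lists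
def buildB (a : List (String × String)) :
    PySem.Dict String Int × PySem.Dict String (List String) :=
  a.foldl (fun st pr =>
    let count := st.1
    let succ := st.2
    let count := if count.contains pr.2 then count else count.insert pr.2 0
    let succ := if succ.contains pr.2 then succ else succ.insert pr.2 []
    let count := if count.contains pr.1 then count else count.insert pr.1 0
    let succ := if succ.contains pr.1 then succ else succ.insert pr.1 []
    let count := count.modify pr.2 0 (· + 1)
    let succ := if pr.2 ∈ succ.getD pr.1 [] then succ
                else succ.modify pr.1 [] (· ++ [pr.2])
    (count, succ)) (PySem.Dict.empty, PySem.Dict.empty)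

-- body of B's while-loop; fuel = len(remaining), which decreases by one per iteration
def part1AltLoop : Nat → List String → PySem.Dict String Int →
    PySem.Dict String (List String) → List String → List String
  | 0, _, _, _, out => out
  | fuel+1, remaining, count, succ, out =>
    match remaining with
    | [] => out
    | r0 :: _ =>
      let best := remaining.foldl
        (fun b x => if count.getD x 0 < count.getD b 0 then x else b) r0
      let remaining := remaining.erase best   -- remaining.remove(best); best is a member
      let count := (succ.getD best []).foldl (fun c n => c.modify n 0 (· - 1)) count
      part1AltLoop fuel remaining count succ (out ++ [best])

def part1_alt (a : List (String × String)) : String :=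
  let cs := buildB a
  let remaining := PySem.List.sorted cs.1.keys (fun x => x) false
  PySem.Str.join "" (part1AltLoop remaining.length remaining cs.1 cs.2 [])

-- ===== PRECONDITION & SPEC =====
def Spec_part1 (a : List (String × String)) (out : String) : Prop := out = part1_alt a
instance (a : List (String × String)) (out : String) : Decidable (Spec_part1 a out) := by unfold Spec_part1; infer_instance

-- ===== CLAIM (what is proved, stated in full; the proofs are below) =====
def Claim_equal_part1 : Prop := ∀ (a : List (String × String)), Dom_part1 a → Spec_part1 a (part1 a)

-- ===== LEMMAS AND PROOFS =====

-- strict lexicographic order on (current count, name) — the key both selections minimise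
def pkeyLt (c : String → Int) (x y : String) : Prop := c x < c y ∨ (c x = c y ∧ x < y)

theorem pkeyLt_irrefl (c : String → Int) (x : String) : ¬ pkeyLt c x x := by
  simp [pkeyLt]

theorem pkeyLt_trans {c : String → Int} {x y z : String}
    (h1 : pkeyLt c x y) (h2 : pkeyLt c y z) : pkeyLt c x z := by
  rcases h1 with h1 | ⟨h1, h1'⟩ <;> rcases h2 with h2 | ⟨h2, h2'⟩
  · exact Or.inl (lt_trans h1 h2)
  · exact Or.inl (by omega)
  · exact Or.inl (by omega)
  · exact Or.inr ⟨by omega, lt_trans h1' h2'⟩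

theorem pkeyLt_total {c : String → Int} {x y : String} (h : x ≠ y) :
    pkeyLt c x y ∨ pkeyLt c y x := by
  rcases lt_trichotomy (c x) (c y) with h1 | h1 | h1
  · exact Or.inl (Or.inl h1)
  · rcases lt_or_gt_of_ne h with h2 | h2
    · exact Or.inl (Or.inr ⟨h1, h2⟩)
    · exact Or.inr (Or.inr ⟨h1.symm, h2⟩)
  · exact Or.inr (Or.inl h1)

-- the A-side selection: min(keys, key=lambda x: (len(dep[x]), x)) is a pkeyLt-minimum
theorem step_cond_iff_nat (L : String → Nat) (x m : String) :
    ((decide (L x < L m) || !decide (L m < L x) && decide (x < m)) = true) ↔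
      pkeyLt (fun s => ((L s : Nat) : Int)) x m := by
  simp only [pkeyLt, Bool.or_eq_true, decide_eq_true_eq, Bool.and_eq_true, Bool.not_eq_true',
    decide_eq_false_iff_not, Nat.cast_lt, Nat.cast_inj]
  constructor
  · rintro (h | ⟨h, h'⟩)
    · exact Or.inl h
    · by_cases h2 : L x < L m
      · exact Or.inl h2
      · exact Or.inr ⟨by omega, h'⟩
  · rintro (h | ⟨h, h'⟩)
    · exact Or.inl h
    · exact Or.inr ⟨by omega, h'⟩

theorem foldl_min_some (f : Option String → String → Option String)
    (hf : ∀ m x, ∃ y, f (some m) x = some y) :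
    ∀ (xs : List String) (b : String), ∃ r, xs.foldl f (some b) = some r := by
  intro xs
  induction xs with
  | nil => exact fun b => ⟨b, rfl⟩
  | cons x xs ih =>
    intro b
    rw [List.foldl_cons]
    obtain ⟨y, hy⟩ := hf b x
    rw [hy]
    exact ih y

theorem foldl_min_aux (c : String → Int) (cond : String → String → Bool)
    (hcond : ∀ x m, cond x m = true ↔ pkeyLt c x m)
    (f : Option String → String → Option String)
    (hf : ∀ m x, f (some m) x = if cond x m then some x else some m) :
    ∀ (xs : List String) (b r : String), xs.foldl f (some b) = some r →
      (r = b ∨ r ∈ xs) ∧ ∀ y, (y = b ∨ y ∈ xs) → ¬ pkeyLt c y r := by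
  intro xs
  induction xs with
  | nil =>
    intro b r h
    simp only [List.foldl_nil, Option.some.injEq] at h
    subst h
    refine ⟨Or.inl rfl, ?_⟩
    rintro y (rfl | hy)
    · exact pkeyLt_irrefl c y
    · cases hy
  | cons x xs ih =>
    intro b r h
    rw [List.foldl_cons, hf] at h
    by_cases hc : pkeyLt c x b
    · rw [if_pos ((hcond x b).2 hc)] at h
      obtain ⟨hr, hmin⟩ := ih x r h
      refine ⟨?_, ?_⟩
      · rcases hr with rfl | hr
        · exact Or.inr (List.mem_cons_self ..)
        · exact Or.inr (List.mem_cons_of_mem _ hr)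
      · rintro y (rfl | hy)
        · intro hlt; exact hmin x (Or.inl rfl) (pkeyLt_trans hc hlt)
        · rcases List.mem_cons.1 hy with rfl | hy
          · exact hmin y (Or.inl rfl)
          · exact hmin y (Or.inr hy)
    · rw [if_neg (by simpa using fun hh => hc ((hcond x b).1 hh))] at h
      obtain ⟨hr, hmin⟩ := ih b r h
      refine ⟨?_, ?_⟩
      · rcases hr with rfl | hr
        · exact Or.inl rfl
        · exact Or.inr (List.mem_cons_of_mem _ hr)
      · rintro y (rfl | hy)
        · exact hmin y (Or.inl rfl)
        · rcases List.mem_cons.1 hy with rfl | hy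
          · intro hlt
            rcases eq_or_ne y b with rfl | hne
            · exact hmin y (Or.inl rfl) hlt
            · rcases pkeyLt_total (c := c) hne with h1 | h1
              · exact hc h1
              · exact hmin b (Or.inl rfl) (pkeyLt_trans h1 hlt)
          · exact hmin y (Or.inr hy)

-- the B-side selection: a strict-< scan over a sorted tail is a pkeyLt-minimum
theorem scan_isMinLex (c : String → Int) :
    ∀ (l : List String) (b : String),
      l.Pairwise (· < ·) → (∀ y ∈ l, b < y) →
      (((l.foldl (fun b x => if c x < c b then x else b) b) = b ∨
        (l.foldl (fun b x => if c x < c b then x else b) b) ∈ l) ∧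
       ∀ y, (y = b ∨ y ∈ l) → ¬ pkeyLt c y (l.foldl (fun b x => if c x < c b then x else b) b)) := by
  intro l
  induction l with
  | nil =>
    intro b _ _
    simp only [List.foldl_nil]
    refine ⟨by left; trivial, ?_⟩
    rintro y (rfl | hy)
    · exact pkeyLt_irrefl c y
    · cases hy
  | cons x l ih =>
    intro b hp hb
    have hbx : b < x := hb x (List.mem_cons_self ..)
    have hxl : ∀ y ∈ l, x < y := fun y hy => (List.pairwise_cons.1 hp).1 y hy
    rw [List.foldl_cons]
    by_cases hc : c x < c b
    · rw [if_pos hc]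
      obtain ⟨hr, hmin⟩ := ih x (List.pairwise_cons.1 hp).2 hxl
      refine ⟨?_, ?_⟩
      · rcases hr with hr | hr
        · exact Or.inr (by rw [hr]; exact List.mem_cons_self ..)
        · exact Or.inr (List.mem_cons_of_mem _ hr)
      · rintro y (rfl | hy)
        · intro hlt; exact hmin x (Or.inl rfl) (pkeyLt_trans (Or.inl hc) hlt)
        · rcases List.mem_cons.1 hy with rfl | hy
          · exact hmin y (Or.inl rfl)
          · exact hmin y (Or.inr hy)
    · rw [if_neg hc]
      obtain ⟨hr, hmin⟩ := ih b (List.pairwise_cons.1 hp).2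
        (fun y hy => lt_trans hbx (hxl y hy))
      refine ⟨?_, ?_⟩
      · rcases hr with hr | hr
        · exact Or.inl hr
        · exact Or.inr (List.mem_cons_of_mem _ hr)
      · rintro y (rfl | hy)
        · exact hmin y (Or.inl rfl)
        · rcases List.mem_cons.1 hy with rfl | hy
          · intro hlt
            have hbx' : pkeyLt c b y := by
              rcases lt_or_eq_of_le (not_lt.1 hc) with h1 | h1
              · exact Or.inl h1
              · exact Or.inr ⟨h1, hbx⟩
            exact hmin b (Or.inl rfl) (pkeyLt_trans hbx' hlt)
          · exact hmin y (Or.inr hy)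

theorem minLex_unique {c : String → Int} {S : List String} {rA rB : String}
    (hA : rA ∈ S) (hB : rB ∈ S)
    (hAmin : ∀ y ∈ S, ¬ pkeyLt c y rA) (hBmin : ∀ y ∈ S, ¬ pkeyLt c y rB) : rA = rB := by
  by_contra hne
  rcases pkeyLt_total (c := c) hne with h | h
  · exact hBmin rA hA h
  · exact hAmin rB hB h

-- Dict plumbing for A's value-rewriting step
theorem get?_mapVals (d : PySem.Dict String (List String)) (f : List String → List String)
    (x : String) :
    (PySem.Dict.mk (d.items.map (fun p => (p.1, f p.2)))).get? x = (d.get? x).map f := by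
  obtain ⟨items⟩ := d
  simp only [PySem.Dict.get?]
  induction items with
  | nil => rfl
  | cons p rest ih =>
    simp only [List.map_cons, List.find?_cons]
    by_cases h : p.1 == x
    · simp [h]
    · simpa [h] using ih

theorem get?_erase_of_ne (d : PySem.Dict String (List String)) (k x : String) (h : x ≠ k) :
    (d.erase k).get? x = d.get? x := by
  obtain ⟨items⟩ := d
  simp only [PySem.Dict.erase, PySem.Dict.get?]
  induction items with
  | nil => rfl
  | cons p rest ih =>
    by_cases hk : p.1 == k
    · have hx : (p.1 == x) = false := by
        simp only [beq_iff_eq] at hk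
        subst hk
        simp [Ne.symm h]
      simp only [List.filter_cons, hk, Bool.not_true, List.find?_cons, hx]
      exact ih
    · simp only [List.filter_cons, hk, Bool.not_false, if_true, List.find?_cons]
      by_cases hx : p.1 == x
      · simp [hx]
      · simp only [hx]
        exact ih

theorem keys_mapVals (d : PySem.Dict String (List String)) (f : List String → List String) :
    (PySem.Dict.mk (d.items.map (fun p => (p.1, f p.2)))).keys = d.keys := by
  simp [PySem.Dict.keys]

theorem keys_erase (d : PySem.Dict String (List String)) (k : String) :
    (d.erase k).keys = d.keys.filter (fun x => !(x == k)) := by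
  obtain ⟨items⟩ := d
  simp only [PySem.Dict.erase, PySem.Dict.keys]
  rw [List.filter_map]
  rfl

-- decrement loop of B: getD after the fold subtracts the multiplicity in the list
theorem getD_foldl_modify_sub_one (l : List String) (c : PySem.Dict String Int) (v : String) :
    (l.foldl (fun c n => c.modify n 0 (· - 1)) c).getD v 0 = c.getD v 0 - l.count v := by
  induction l generalizing c with
  | nil => simp
  | cons x l ih =>
    rw [List.foldl_cons, ih, PySem.Dict.getD_modify, List.count_cons]
    by_cases h : v = x
    · simp [h]
      omega
    · simp [h, Ne.symm]

-- "setdefault with the getD default" is invisible to getD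
theorem getD_setdefault0 {ν : Type} (d : PySem.Dict String ν) (k q : String) (dflt : ν) :
    ((if d.contains k then d else d.insert k dflt).getD q dflt) = d.getD q dflt := by
  by_cases h : d.contains k
  · simp [h]
  · rw [if_neg h, PySem.Dict.getD_insert]
    by_cases hq : q = k
    · subst hq; simp [PySem.Dict.getD_of_not_contains _ _ (by simpa using h)]
    · simp [hq]

-- the bisimulation invariant between A's dict state and B's (remaining, count, succ) state
structure LoopInv (dep : PySem.Dict String (List String)) (remaining : List String)
    (count : PySem.Dict String Int) (succ : PySem.Dict String (List String)) : Prop where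
  nodupA : dep.keys.Nodup
  sortedR : remaining.Pairwise (· < ·)
  memEq : ∀ x, x ∈ remaining ↔ x ∈ dep.keys
  countEq : ∀ x ∈ remaining, count.getD x 0 = ((dep.getD x []).length : Int)
  succMem : ∀ p x, p ∈ remaining → x ∈ remaining → (x ∈ succ.getD p [] ↔ p ∈ dep.getD x [])
  succNodup : ∀ p, (succ.getD p []).Nodup
  lenEq : remaining.length = dep.size

theorem pkeyLt_congr {c d : String → Int} {x y : String}
    (hx : c x = d x) (hy : c y = d y) (h : pkeyLt c x y) : pkeyLt d x y := by
  rcases h with h | ⟨h, h'⟩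
  · exact Or.inl (by omega)
  · exact Or.inr ⟨by omega, h'⟩

-- A's per-pick dict update: every remaining value list loses its first occurrence of m
theorem stepA_keys (dep : PySem.Dict String (List String)) (m : String) :
    (PySem.Dict.mk ((dep.erase m).items.map
      (fun p => (p.1, if m ∈ p.2 then p.2.erase m else p.2)))).keys
    = dep.keys.filter (fun x => !(x == m)) := by
  have h1 : (PySem.Dict.mk ((dep.erase m).items.map
      (fun p => (p.1, if m ∈ p.2 then p.2.erase m else p.2)))).keys
      = (dep.erase m).keys :=
    keys_mapVals (dep.erase m) (fun l => if m ∈ l then l.erase m else l)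
  rw [h1, keys_erase]

theorem stepA_getD (dep : PySem.Dict String (List String)) (m x : String) (hx : x ≠ m) :
    (PySem.Dict.mk ((dep.erase m).items.map
      (fun p => (p.1, if m ∈ p.2 then p.2.erase m else p.2)))).getD x []
    = (dep.getD x []).erase m := by
  have h1 : (PySem.Dict.mk ((dep.erase m).items.map
      (fun p => (p.1, if m ∈ p.2 then p.2.erase m else p.2)))).get? x
      = ((dep.erase m).get? x).map (fun l => if m ∈ l then l.erase m else l) :=
    get?_mapVals (dep.erase m) (fun l => if m ∈ l then l.erase m else l) x
  rw [PySem.Dict.getD_eq_get?_getD, h1, get?_erase_of_ne _ _ _ hx,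
    PySem.Dict.getD_eq_get?_getD]
  cases h : dep.get? x with
  | none => simp
  | some l =>
    simp only [Option.map_some, Option.getD_some]
    by_cases hm : m ∈ l
    · rw [if_pos hm]
    · rw [if_neg hm, List.erase_of_not_mem hm]

theorem loop_eq : ∀ (n : Nat) (dep : PySem.Dict String (List String)) (remaining : List String)
    (count : PySem.Dict String Int) (succ : PySem.Dict String (List String)) (out : List String),
    LoopInv dep remaining count succ → remaining.length = n →
    part1Loop n dep out = part1AltLoop n remaining count succ out := by
  intro n
  induction n with
  | zero => intro dep remaining count succ out _ _; rfl
  | succ n ih =>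
    intro dep remaining count succ out inv hlen
    obtain ⟨r0, rest, rfl⟩ : ∃ r0 rest, remaining = r0 :: rest := by
      cases remaining with
      | nil => simp at hlen
      | cons a l => exact ⟨a, l, rfl⟩
    have hRnodup : (r0 :: rest).Nodup :=
      inv.sortedR.imp (fun h => ne_of_lt h)
    have hsize : dep.size = n + 1 := by rw [← inv.lenEq, hlen]
    have hkeyslen : dep.keys.length = n + 1 := by
      simpa [PySem.Dict.keys, PySem.Dict.size] using hsize
    obtain ⟨kh, ktl, hkeys⟩ : ∃ kh ktl, dep.keys = kh :: ktl := by
      cases hk : dep.keys with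
      | nil => rw [hk] at hkeyslen; simp at hkeyslen
      | cons a l => exact ⟨a, l, rfl⟩
    have hbridge : PySem.List.min2? dep.keys (fun x => (dep.getD x []).length) (fun x => x)
        = dep.keys.foldl (fun acc x => match acc with
          | none => some x
          | some m => if (decide ((dep.getD x []).length < (dep.getD m []).length) ||
              !decide ((dep.getD m []).length < (dep.getD x []).length) && decide (x < m)) = true
              then some x else some m) none := by
      simp only [PySem.List.min2?]
      apply List.foldl_ext
      intro a x _
      cases a <;> rfl
    -- A-side selection
    obtain ⟨rA, hrA⟩ := foldl_min_some
      (fun acc x => match acc with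
        | none => some x
        | some m => if (decide ((dep.getD x []).length < (dep.getD m []).length) ||
            !decide ((dep.getD m []).length < (dep.getD x []).length) && decide (x < m)) = true
            then some x else some m)
      (fun m x => by
        by_cases h : (decide ((dep.getD x []).length < (dep.getD m []).length) ||
            !decide ((dep.getD m []).length < (dep.getD x []).length) && decide (x < m)) = true
        · exact ⟨x, by rw [show (fun acc x => match acc with
            | none => some x
            | some m => if (decide ((dep.getD x []).length < (dep.getD m []).length) ||
                !decide ((dep.getD m []).length < (dep.getD x []).length) && decide (x < m)) = true
                then some x else some m) (some m) x = if (decide ((dep.getD x []).length < (dep.getD m []).length) ||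
                !decide ((dep.getD m []).length < (dep.getD x []).length) && decide (x < m)) = true
                then some x else some m from rfl, if_pos h]⟩
        · exact ⟨m, by rw [show (fun acc x => match acc with
            | none => some x
            | some m => if (decide ((dep.getD x []).length < (dep.getD m []).length) ||
                !decide ((dep.getD m []).length < (dep.getD x []).length) && decide (x < m)) = true
                then some x else some m) (some m) x = if (decide ((dep.getD x []).length < (dep.getD m []).length) ||
                !decide ((dep.getD m []).length < (dep.getD x []).length) && decide (x < m)) = true
                then some x else some m from rfl, if_neg h]⟩)
      ktl kh
    have hmin2 : PySem.List.min2? dep.keys (fun x => (dep.getD x []).length) (fun x => x)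
        = some rA := by
      rw [hbridge, hkeys, List.foldl_cons]
      exact hrA
    obtain ⟨hrAmem0, hrAmin0⟩ := foldl_min_aux
      (fun x => (((dep.getD x []).length : Nat) : Int))
      (fun x m => decide ((dep.getD x []).length < (dep.getD m []).length) ||
        !decide ((dep.getD m []).length < (dep.getD x []).length) && decide (x < m))
      (step_cond_iff_nat (fun x => (dep.getD x []).length))
      _ (fun m x => rfl) ktl kh rA hrA
    have hrAkeys : rA ∈ dep.keys := by
      rw [hkeys]
      rcases hrAmem0 with rfl | h
      · exact List.mem_cons_self ..
      · exact List.mem_cons_of_mem _ h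
    have hrAminKeys : ∀ y ∈ dep.keys, ¬ pkeyLt (fun x => (((dep.getD x []).length : Nat) : Int)) y rA := by
      intro y hy
      rw [hkeys] at hy
      rcases List.mem_cons.1 hy with rfl | hy
      · exact hrAmin0 y (Or.inl rfl)
      · exact hrAmin0 y (Or.inr hy)
    have hrAR : rA ∈ r0 :: rest := (inv.memEq rA).2 hrAkeys
    -- B-side selection
    have hp := List.pairwise_cons.1 inv.sortedR
    obtain ⟨hrBmem0, hrBmin0⟩ := scan_isMinLex (fun x => count.getD x 0) rest r0 hp.2 hp.1
    have hscan : (r0 :: rest).foldl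
        (fun b x => if count.getD x 0 < count.getD b 0 then x else b) r0
        = rest.foldl (fun b x => if count.getD x 0 < count.getD b 0 then x else b) r0 := by
      rw [List.foldl_cons, if_neg (lt_irrefl _)]
    have hrBR : rest.foldl (fun b x => if count.getD x 0 < count.getD b 0 then x else b) r0
        ∈ r0 :: rest := by
      rcases hrBmem0 with h | h
      · rw [h]; exact List.mem_cons_self ..
      · exact List.mem_cons_of_mem _ h
    have hrBmin : ∀ y ∈ r0 :: rest, ¬ pkeyLt (fun x => count.getD x 0) y
        (rest.foldl (fun b x => if count.getD x 0 < count.getD b 0 then x else b) r0) := by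
      intro y hy
      rcases List.mem_cons.1 hy with rfl | hy
      · exact hrBmin0 y (Or.inl rfl)
      · exact hrBmin0 y (Or.inr hy)
    -- the two selections agree
    have hceq : ∀ x ∈ r0 :: rest, count.getD x 0 = (((dep.getD x []).length : Nat) : Int) :=
      inv.countEq
    have hrAminB : ∀ y ∈ r0 :: rest, ¬ pkeyLt (fun x => count.getD x 0) y rA := by
      intro y hy hlt
      exact hrAminKeys y ((inv.memEq y).1 hy)
        (pkeyLt_congr (hceq y hy) (hceq rA hrAR) hlt)
    have hbest : rA = rest.foldl (fun b x => if count.getD x 0 < count.getD b 0 then x else b) r0 :=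
      minLex_unique hrAR hrBR hrAminB hrBmin
    -- evaluate one step of each loop
    rw [part1Loop, hmin2, part1AltLoop]
    simp only [← hbest, hscan]
    -- new states
    set dep' : PySem.Dict String (List String) :=
      ⟨(dep.erase rA).items.map (fun p => (p.1, if rA ∈ p.2 then p.2.erase rA else p.2))⟩ with hdep'
    have hkeys' : dep'.keys = dep.keys.filter (fun x => !(x == rA)) := stepA_keys dep rA
    have hgetD' : ∀ x, x ≠ rA → dep'.getD x [] = (dep.getD x []).erase rA :=
      fun x hx => stepA_getD dep rA x hx
    have hmemK' : ∀ x, x ∈ dep'.keys ↔ x ∈ dep.keys ∧ x ≠ rA := by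
      intro x
      rw [hkeys', List.mem_filter]
      simp
    have hmemR' : ∀ x, x ∈ (r0 :: rest).erase rA ↔ x ∈ r0 :: rest ∧ x ≠ rA := by
      intro x
      exact hRnodup.mem_erase_iff.trans and_comm
    have hsub : ∀ x, x ∈ (r0 :: rest).erase rA → x ∈ r0 :: rest :=
      fun x hx => ((hmemR' x).1 hx).1
    have hcount' : ∀ x ∈ (r0 :: rest).erase rA,
        ((PySem.Dict.getD ((PySem.Dict.getD succ rA []).foldl
          (fun c n => c.modify n 0 (· - 1)) count) x 0)) = ((dep'.getD x []).length : Int) := by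
      intro x hx
      obtain ⟨hxR, hxne2⟩ := (hmemR' x).1 hx
      rw [getD_foldl_modify_sub_one, hgetD' x hxne2, hceq x hxR]
      have hmem_iff := inv.succMem rA x hrAR hxR
      by_cases hm : rA ∈ dep.getD x []
      · have hcnt : (succ.getD rA []).count x = 1 :=
          List.count_eq_one_of_mem (inv.succNodup rA) (hmem_iff.2 hm)
        rw [hcnt, List.length_erase_of_mem hm]
        have : 1 ≤ (dep.getD x []).length := List.length_pos_of_mem hm
        push_cast
        omega
      · have hcnt : (succ.getD rA []).count x = 0 :=
          List.count_eq_zero.2 (fun hc => hm (hmem_iff.1 hc))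
        rw [hcnt, List.erase_of_not_mem hm]
        omega
    have inv' : LoopInv dep' ((r0 :: rest).erase rA)
        ((PySem.Dict.getD succ rA []).foldl (fun c n => c.modify n 0 (· - 1)) count) succ := by
      refine ⟨?_, ?_, ?_, ?_, ?_, inv.succNodup, ?_⟩
      · rw [hkeys']; exact inv.nodupA.filter _
      · exact inv.sortedR.sublist List.erase_sublist
      · intro x
        rw [hmemR' x, hmemK' x, inv.memEq x]
      · exact hcount'
      · intro p x hpR hxR
        have hpne : p ≠ rA := ((hmemR' p).1 hpR).2
        have hxne : x ≠ rA := ((hmemR' x).1 hxR).2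
        rw [hgetD' x hxne, List.mem_erase_of_ne hpne]
        exact inv.succMem p x (hsub p hpR) (hsub x hxR)
      · have hml : ((r0 :: rest).erase rA).length = n := by
          rw [List.length_erase_of_mem hrAR, hlen]
          omega
        rw [hml]
        have hsz : dep'.size = dep'.keys.length := by
          simp [PySem.Dict.keys, PySem.Dict.size]
        have hf : dep.keys.filter (fun x => !(x == rA)) = dep.keys.filter (fun x => x != rA) :=
          List.filter_congr (fun x _ => rfl)
        rw [hsz, hkeys', hf, ← List.Nodup.erase_eq_filter inv.nodupA rA,
          List.length_erase_of_mem hrAkeys, hkeyslen]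
        omega
    exact ih dep' _ _ succ (out ++ [rA]) inv'
      (by rw [List.length_erase_of_mem hrAR, hlen]; omega)

-- the build-phase invariant
structure BuildInv (dep : PySem.Dict String (List String))
    (count : PySem.Dict String Int) (succ : PySem.Dict String (List String)) : Prop where
  ndA : dep.keys.Nodup
  ndC : count.keys.Nodup
  keysEq : ∀ x, x ∈ count.keys ↔ x ∈ dep.keys
  countEq : ∀ x, count.getD x 0 = ((dep.getD x []).length : Int)
  succMem : ∀ p x, x ∈ succ.getD p [] ↔ p ∈ dep.getD x []
  succNd : ∀ p, (succ.getD p []).Nodup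

-- the build step of each port, as standalone functions (pointwise equal to the fold bodies)
def stepA (dep : PySem.Dict String (List String)) (p n : String) :
    PySem.Dict String (List String) :=
  let d := dep.modify n [] (· ++ [p])
  if d.contains p then d else d.insert p []

def stepC (count : PySem.Dict String Int) (p n : String) : PySem.Dict String Int :=
  let c1 := if count.contains n then count else count.insert n 0
  let c2 := if c1.contains p then c1 else c1.insert p 0
  c2.modify n 0 (· + 1)

def stepS (succ : PySem.Dict String (List String)) (p n : String) :
    PySem.Dict String (List String) :=
  let s1 := if succ.contains n then succ else succ.insert n []
  let s2 := if s1.contains p then s1 else s1.insert p []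
  if n ∈ s2.getD p [] then s2 else s2.modify p [] (· ++ [n])

theorem mem_keys_setdefault {ν : Type} (d : PySem.Dict String ν) (k : String) (v : ν)
    (x : String) : x ∈ (if d.contains k then d else d.insert k v).keys ↔ x = k ∨ x ∈ d.keys := by
  by_cases h : d.contains k
  · rw [if_pos h]
    have hk := (PySem.Dict.contains_iff_mem_keys d k).1 h
    constructor
    · exact Or.inr
    · rintro (rfl | hx)
      · exact hk
      · exact hx
  · rw [if_neg h]
    exact PySem.Dict.mem_keys_insert d k x v

theorem nodup_keys_setdefault {ν : Type} (d : PySem.Dict String ν) (k : String) (v : ν)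
    (h : d.keys.Nodup) : (if d.contains k then d else d.insert k v).keys.Nodup := by
  by_cases hc : d.contains k
  · rwa [if_pos hc]
  · rw [if_neg hc]
    exact PySem.Dict.nodup_keys_insert d k v h

theorem mem_keys_modify' {ν : Type} (d : PySem.Dict String ν) (k : String) (d0 : ν) (f : ν → ν)
    (x : String) : x ∈ (d.modify k d0 f).keys ↔ x = k ∨ x ∈ d.keys := by
  rw [PySem.Dict.keys_modify]
  exact PySem.Dict.mem_keys_insert _ _ x _

theorem nodup_keys_modify' {ν : Type} (d : PySem.Dict String ν) (k : String) (d0 : ν) (f : ν → ν)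
    (h : d.keys.Nodup) : (d.modify k d0 f).keys.Nodup := by
  rw [PySem.Dict.keys_modify]
  exact PySem.Dict.nodup_keys_insert _ _ _ h

-- getD through the whole stepC / the setdefault prefix of stepS
theorem getD_stepC (count : PySem.Dict String Int) (p n q : String) :
    (stepC count p n).getD q 0 = if q = n then count.getD n 0 + 1 else count.getD q 0 := by
  unfold stepC
  simp only []
  rw [PySem.Dict.getD_modify]
  by_cases h : q = n <;>
    simp [h, getD_setdefault0, getD_setdefault0 (if count.contains n then count else count.insert n 0) p]

theorem getD_stepS (succ : PySem.Dict String (List String)) (p n q : String) :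
    (stepS succ p n).getD q [] =
      if n ∈ succ.getD p [] then succ.getD q []
      else if q = p then succ.getD p [] ++ [n] else succ.getD q [] := by
  unfold stepS
  simp only []
  have h2 : ∀ r, ((if (if succ.contains n then succ else succ.insert n []).contains p
      then (if succ.contains n then succ else succ.insert n [])
      else (if succ.contains n then succ else succ.insert n []).insert p [])).getD r []
      = succ.getD r [] := by
    intro r
    rw [getD_setdefault0, getD_setdefault0]
  rw [h2 p]
  by_cases hm : n ∈ succ.getD p []
  · rw [if_pos hm, if_pos hm, h2 q]
  · rw [if_neg hm, if_neg hm, PySem.Dict.getD_modify]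
    by_cases hq : q = p
    · rw [if_pos hq, if_pos hq, h2 p]
    · rw [if_neg hq, if_neg hq, h2 q]

theorem getD_stepA (dep : PySem.Dict String (List String)) (p n q : String) :
    (stepA dep p n).getD q [] =
      if q = n then dep.getD n [] ++ [p] else dep.getD q [] := by
  unfold stepA
  simp only []
  rw [getD_setdefault0, PySem.Dict.getD_modify]

theorem mem_keys_stepA (dep : PySem.Dict String (List String)) (p n x : String) :
    x ∈ (stepA dep p n).keys ↔ x = p ∨ x = n ∨ x ∈ dep.keys := by
  unfold stepA
  simp only []
  rw [mem_keys_setdefault, mem_keys_modify']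

theorem mem_keys_stepC (count : PySem.Dict String Int) (p n x : String) :
    x ∈ (stepC count p n).keys ↔ x = n ∨ x = p ∨ x ∈ count.keys := by
  unfold stepC
  simp only []
  rw [mem_keys_modify', mem_keys_setdefault, mem_keys_setdefault]
  tauto

theorem build_step (dep : PySem.Dict String (List String)) (count : PySem.Dict String Int)
    (succ : PySem.Dict String (List String)) (p n : String) (h : BuildInv dep count succ) :
    BuildInv (stepA dep p n) (stepC count p n) (stepS succ p n) := by
  refine ⟨?_, ?_, ?_, ?_, ?_, ?_⟩
  · unfold stepA
    simp only []
    exact nodup_keys_setdefault _ _ _ (nodup_keys_modify' _ _ _ _ h.ndA)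
  · unfold stepC
    simp only []
    exact nodup_keys_modify' _ _ _ _
      (nodup_keys_setdefault _ _ _ (nodup_keys_setdefault _ _ _ h.ndC))
  · intro x
    rw [mem_keys_stepC, mem_keys_stepA]
    have := h.keysEq x
    tauto
  · intro x
    rw [getD_stepC, getD_stepA]
    by_cases hx : x = n
    · rw [if_pos hx, if_pos hx]
      have := h.countEq n
      simp only [List.length_append, List.length_cons, List.length_nil]
      push_cast
      omega
    · rw [if_neg hx, if_neg hx]
      exact h.countEq x
  · intro q x
    rw [getD_stepS, getD_stepA]
    by_cases hm : n ∈ succ.getD p []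
    · rw [if_pos hm]
      have hpn : p ∈ dep.getD n [] := (h.succMem p n).1 hm
      by_cases hx : x = n
      · subst hx
        rw [if_pos rfl]
        rw [h.succMem q x]
        constructor
        · intro hq; exact List.mem_append_left _ hq
        · intro hq
          rcases List.mem_append.1 hq with hq | hq
          · exact hq
          · rw [List.mem_singleton.1 hq]; exact hpn
      · rw [if_neg hx]
        exact h.succMem q x
    · rw [if_neg hm]
      by_cases hq : q = p
      · subst hq
        rw [if_pos rfl]
        by_cases hx : x = n
        · subst hx
          rw [if_pos rfl]
          simp [List.mem_append]
        · rw [if_neg hx]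
          rw [List.mem_append, List.mem_singleton]
          have := h.succMem q x
          tauto
      · rw [if_neg hq]
        by_cases hx : x = n
        · subst hx
          rw [if_pos rfl, List.mem_append, List.mem_singleton]
          have := h.succMem q x
          tauto
        · rw [if_neg hx]
          exact h.succMem q x
  · intro q
    rw [getD_stepS]
    by_cases hm : n ∈ succ.getD p []
    · rw [if_pos hm]; exact h.succNd q
    · rw [if_neg hm]
      by_cases hq : q = p
      · rw [if_pos hq]
        subst hq
        exact (h.succNd q).append (List.nodup_singleton n)
          (by intro a ha hb; rw [List.mem_singleton] at hb; subst hb; exact hm ha)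
      · rw [if_neg hq]; exact h.succNd q

theorem build_aux : ∀ (l : List (String × String)) (dep : PySem.Dict String (List String))
    (count : PySem.Dict String Int) (succ : PySem.Dict String (List String)),
    BuildInv dep count succ →
    BuildInv (l.foldl (fun d pr => stepA d pr.1 pr.2) dep)
      ((l.foldl (fun st pr => (stepC st.1 pr.1 pr.2, stepS st.2 pr.1 pr.2)) (count, succ)).1)
      ((l.foldl (fun st pr => (stepC st.1 pr.1 pr.2, stepS st.2 pr.1 pr.2)) (count, succ)).2) := by
  intro l
  induction l with
  | nil => intro dep count succ h; exact h
  | cons pr l ih =>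
    intro dep count succ h
    rw [List.foldl_cons, List.foldl_cons]
    exact ih _ _ _ (build_step dep count succ pr.1 pr.2 h)

theorem buildInv_empty : BuildInv PySem.Dict.empty PySem.Dict.empty PySem.Dict.empty := by
  refine ⟨?_, ?_, ?_, ?_, ?_, ?_⟩ <;>
      simp [PySem.Dict.keys, PySem.Dict.empty, PySem.Dict.getD, PySem.Dict.get?]

theorem build_inv (a : List (String × String)) :
    BuildInv (getDependencies a) (buildB a).1 (buildB a).2 := by
  have hA : getDependencies a = a.foldl (fun d pr => stepA d pr.1 pr.2) PySem.Dict.empty := by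
    unfold getDependencies
    apply List.foldl_ext
    intro d pr _
    rfl
  have hB : buildB a = a.foldl (fun st pr => (stepC st.1 pr.1 pr.2, stepS st.2 pr.1 pr.2))
      (PySem.Dict.empty, PySem.Dict.empty) := by
    unfold buildB
    apply List.foldl_ext
    intro st pr _
    rfl
  rw [hA, hB]
  exact build_aux a _ _ _ buildInv_empty

theorem initial_inv (a : List (String × String)) :
    LoopInv (getDependencies a) (PySem.List.sorted (buildB a).1.keys (fun x => x) false)
      (buildB a).1 (buildB a).2 := by
  have h := build_inv a
  have hperm : (PySem.List.sorted (buildB a).1.keys (fun x => x) false).Perm (buildB a).1.keys :=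
    PySem.List.sorted_perm ..
  have hnd : (PySem.List.sorted (buildB a).1.keys (fun x => x) false).Nodup :=
    hperm.nodup_iff.2 h.ndC
  have hpw : (PySem.List.sorted (buildB a).1.keys (fun x => x) false).Pairwise (· < ·) := by
    have hle := PySem.List.sorted_pairwise (buildB a).1.keys (fun x => x)
    exact (hle.and hnd).imp (fun hab => lt_of_le_of_ne hab.1 hab.2)
  have hmem : ∀ x, x ∈ PySem.List.sorted (buildB a).1.keys (fun x => x) false ↔
      x ∈ (getDependencies a).keys := by
    intro x
    rw [PySem.List.mem_sorted]
    exact h.keysEq x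
  refine ⟨h.ndA, hpw, hmem, fun x _ => h.countEq x, fun p x _ _ => h.succMem p x,
    h.succNd, ?_⟩
  rw [PySem.List.length_sorted]
  have hpk : (buildB a).1.keys.Perm (getDependencies a).keys :=
    (List.perm_ext_iff_of_nodup h.ndC h.ndA).2 h.keysEq
  rw [hpk.length_eq]
  simp [PySem.Dict.keys, PySem.Dict.size]

-- ===== VERDICT (by name: the statement is the Claim_ definition above) =====
theorem part1_spec : Claim_equal_part1 := by
  intro a _
  have hinv := initial_inv a
  have hlen := hinv.lenEq
  show part1 a = part1_alt a
  unfold part1 part1_alt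
  simp only []
  rw [← hlen, loop_eq _ _ _ _ _ _ hinv rfl]
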